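-- pv_equiv track=rewrite | github.com/s5unnyjjj/Algorithm | 02_Programmers/014_Lv2_디펜스게임.py | solution
-- ===== SOURCE A (Python) =====
-- def solution(n, k, enemy):
--     answer = 0
--     heap = []
--     sum_enemy = 0
--
--     for en in enemy:
--         heap.append(en)
--         sum_enemy += en
--         if sum_enemy > n:
--             if k == 0:
--                 break
--             max_value = max(heap)
--             sum_enemy -= max_value
--             heap.remove(max_value)
--             k -= 1
--         answer += 1
--
--     return answer
-- ===== SOURCE B (Python) =====
-- def solution(n, k, enemy):
--     answer = 0
--     fought = []  # enemy counts of rounds fought so far, kept in ascending order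
--     total = 0
--     for en in enemy:
--         # binary search: first position whose element is > en
--         lo = 0
--         hi = len(fought)
--         while lo < hi:
--             mid = (lo + hi) // 2
--             if fought[mid] <= en:
--                 lo = mid + 1
--             else:
--                 hi = mid
--         fought.insert(lo, en)
--         total += en
--         if total > n:
--             if k == 0:
--                 break
--             total -= fought.pop()  # largest fought group is last: O(1) removal
--             k -= 1
--         answer += 1
--     return answer
-- ===== Notes on version B (the rewrite author's own statement) =====
-- stated objective: alternative
-- what changed: B maintains the fought groups as an ascending sorted list (hand-written binary search for the insertion point, O(1) pop of the last element as the maximum) instead of A's unsorted list with a full max-scan plus list.remove on every overflow; equivalence rests on the sorted list being a permutation of A's list whose last element is A's max.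
import Mathlib
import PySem

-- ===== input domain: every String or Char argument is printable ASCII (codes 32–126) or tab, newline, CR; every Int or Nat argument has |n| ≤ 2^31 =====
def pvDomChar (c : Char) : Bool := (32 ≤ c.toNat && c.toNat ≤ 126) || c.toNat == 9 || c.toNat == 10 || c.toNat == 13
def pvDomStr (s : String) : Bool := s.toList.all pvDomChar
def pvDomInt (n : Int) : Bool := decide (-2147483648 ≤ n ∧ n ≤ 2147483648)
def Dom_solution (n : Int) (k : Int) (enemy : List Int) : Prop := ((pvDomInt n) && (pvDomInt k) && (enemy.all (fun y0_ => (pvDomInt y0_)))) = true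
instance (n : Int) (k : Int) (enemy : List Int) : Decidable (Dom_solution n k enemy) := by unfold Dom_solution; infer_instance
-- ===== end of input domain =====

-- B keeps the fought groups as an ascending sorted list (hand-written binary search for the
-- insertion point, pop of the last element as the maximum) instead of A's unsorted list with
-- a full max-scan plus list.remove on each overflow (objective: alternative data structure).

-- ===== PORT A =====
-- loop state: remaining enemy list, answer, heap (unsorted fought list), running sum, k
def solGo (n : Int) : List Int → Int → List Int → Int → Int → Int
  | [], answer, _, _, _ => answer
  | en :: rest, answer, heap, s, k =>
      let heap2 := heap ++ [en]
      let s2 := s + en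
      if s2 > n then
        if k = 0 then answer
        else
          match PySem.List.max? heap2 (fun x => x) with
          | none => answer            -- unreachable: heap2 ≠ []
          | some m =>
            match PySem.List.remove? heap2 m with
            | none => answer          -- unreachable: m ∈ heap2
            | some heap3 => solGo n rest (answer + 1) heap3 (s2 - m) (k - 1)
      else solGo n rest (answer + 1) heap2 s2 k

def solution (n : Int) (k : Int) (enemy : List Int) : Int :=
  solGo n enemy 0 [] 0 k

-- ===== PORT B =====
-- B's hand-written binary search: first position in fought whose element is > en
-- (lo, hi are nonnegative Python ints throughout the loop, represented as Nat; (lo+hi)//2 = Nat division)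
def bsLoop (fought : List Int) (en : Int) (lo hi : Nat) : Nat :=
  if _h : lo < hi then
    let mid := (lo + hi) / 2
    match fought[mid]? with
    | none => lo            -- unreachable: mid < hi ≤ fought.length
    | some v => if v ≤ en then bsLoop fought en (mid + 1) hi else bsLoop fought en lo mid
  else lo
termination_by hi - lo
decreasing_by all_goals omega

def solAltGo (n : Int) : List Int → Int → List Int → Int → Int → Int
  | [], answer, _, _, _ => answer
  | en :: rest, answer, fought, total, k =>
      let i := bsLoop fought en 0 fought.length
      let fought2 := PySem.List.insert fought (i : Int) en
      let total2 := total + en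
      if total2 > n then
        if k = 0 then answer
        else
          match PySem.List.pop? fought2 (-1) with
          | none => answer            -- unreachable: fought2 ≠ []
          | some (m, fought3) => solAltGo n rest (answer + 1) fought3 (total2 - m) (k - 1)
      else solAltGo n rest (answer + 1) fought2 total2 k

def solution_alt (n : Int) (k : Int) (enemy : List Int) : Int :=
  solAltGo n enemy 0 [] 0 k

-- ===== PRECONDITION & SPEC =====
def Spec_solution (n : Int) (k : Int) (enemy : List Int) (out : Int) : Prop := out = solution_alt n k enemy
instance (n : Int) (k : Int) (enemy : List Int) (out : Int) : Decidable (Spec_solution n k enemy out) := by unfold Spec_solution; infer_instance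

-- ===== CLAIM (what is proved, stated in full; the proofs are below) =====
def Claim_equal_solution : Prop := ∀ (n : Int) (k : Int) (enemy : List Int), Dom_solution n k enemy → Spec_solution n k enemy (solution n k enemy)

-- ===== LEMMAS AND PROOFS =====

-- binary-search invariant: everything left of the result is ≤ en, everything from it on is > en
theorem bsLoop_spec (fought : List Int) (en : Int)
    (hsort : fought.Pairwise (· ≤ ·)) : ∀ (lo hi : Nat), lo ≤ hi → hi ≤ fought.length →
    (∀ j (hj : j < fought.length), j < lo → fought[j] ≤ en) →
    (∀ j (hj : j < fought.length), hi ≤ j → en < fought[j]) →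
    lo ≤ bsLoop fought en lo hi ∧ bsLoop fought en lo hi ≤ hi ∧
    (∀ j (hj : j < fought.length), j < bsLoop fought en lo hi → fought[j] ≤ en) ∧
    (∀ j (hj : j < fought.length), bsLoop fought en lo hi ≤ j → en < fought[j]) := by
  have hpos := List.pairwise_iff_getElem.mp hsort
  intro lo hi
  induction hlh : hi - lo using Nat.strong_induction_on generalizing lo hi with
  | _ d ih =>
    intro hle hhi hleft hright
    rw [bsLoop]
    by_cases h : lo < hi
    · simp only [dif_pos h]
      have hmid : (lo + hi) / 2 < fought.length := by omega
      have hget : fought[(lo + hi) / 2]? = some fought[(lo + hi) / 2] := by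
        exact List.getElem?_eq_getElem hmid
      simp only [hget]
      by_cases hv : fought[(lo + hi) / 2] ≤ en
      · simp only [if_pos hv]
        have := ih (hi - ((lo + hi) / 2 + 1)) (by omega) ((lo + hi) / 2 + 1) hi rfl
          (by omega) hhi
          (by intro j hj hjlt
              by_cases hj2 : j = (lo + hi) / 2
              · subst hj2; exact hv
              · by_cases hj3 : j < lo
                · exact hleft j hj hj3
                · exact le_trans (hpos j ((lo + hi) / 2) hj hmid (by omega)) hv)
          hright
        exact ⟨by omega, this.2.1, this.2.2.1, this.2.2.2⟩
      · simp only [if_neg hv]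
        have := ih ((lo + hi) / 2 - lo) (by omega) lo ((lo + hi) / 2) rfl
          (by omega) (by omega) hleft
          (by intro j hj hjge
              by_cases hj2 : j = (lo + hi) / 2
              · subst hj2; omega
              · exact lt_of_lt_of_le (by omega) (hpos ((lo + hi) / 2) j hmid hj (by omega)))
        exact ⟨this.1, by omega, this.2.2.1, this.2.2.2⟩
    · simp only [dif_neg h]
      exact ⟨le_refl _, by omega, hleft, fun j hj hge => hright j hj (by omega)⟩

-- in a ≤-sorted list d ++ [m], every element is ≤ m
-- inserting at the binary-search position keeps the list a sorted permutation
theorem insert_bs_facts (fought : List Int) (en : Int) (hsort : fought.Pairwise (· ≤ ·)) :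
    (PySem.List.insert fought ((bsLoop fought en 0 fought.length : Nat) : Int) en).Perm (en :: fought) ∧
    (PySem.List.insert fought ((bsLoop fought en 0 fought.length : Nat) : Int) en).Pairwise (· ≤ ·) ∧
    PySem.List.insert fought ((bsLoop fought en 0 fought.length : Nat) : Int) en ≠ [] := by
  obtain ⟨-, hile, hleft, hright⟩ :=
    bsLoop_spec fought en hsort 0 fought.length (Nat.zero_le _) (le_refl _)
      (by intro j hj hlt; omega) (by intro j hj hge; omega)
  set i := bsLoop fought en 0 fought.length with hi
  rw [PySem.List.insert_natCast fought i en hile]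
  refine ⟨?_, ?_, by simp⟩
  · have h1 := List.perm_middle (a := en) (l₁ := fought.take i) (l₂ := fought.drop i)
    rwa [List.take_append_drop] at h1
  · rw [List.pairwise_append]
    refine ⟨hsort.sublist (List.take_sublist i fought), ?_, ?_⟩
    · rw [List.pairwise_cons]
      refine ⟨?_, hsort.sublist (List.drop_sublist i fought)⟩
      intro b hb
      obtain ⟨j, hj, rfl⟩ := List.mem_iff_getElem.mp hb
      rw [List.getElem_drop]
      exact le_of_lt (hright (i + j) (by simp at hj; omega) (by omega))
    · intro a ha b hb
      obtain ⟨j, hj, rfl⟩ := List.mem_iff_getElem.mp ha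
      rw [List.getElem_take]
      have hjlen : j < fought.length := by
        have := List.length_take_le i fought; omega
      have hja : fought[j] ≤ en := hleft j hjlen (by simp at hj; omega)
      rcases List.mem_cons.mp hb with rfl | hb
      · exact hja
      · obtain ⟨j2, hj2, rfl⟩ := List.mem_iff_getElem.mp hb
        rw [List.getElem_drop]
        exact le_trans hja (le_of_lt (hright (i + j2) (by simp at hj2; omega) (by omega)))

theorem sorted_last_max {d : List Int} {m : Int}
    (h : (d ++ [m]).Pairwise (· ≤ ·)) : ∀ y ∈ d ++ [m], y ≤ m := by
  intro y hy
  rcases List.mem_append.mp hy with hy | hy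
  · exact (List.pairwise_append.mp h).2.2 y hy m (by simp)
  · simp at hy; omega

-- the main simulation invariant: same sum/k/answer, fought is a sorted permutation of heap
theorem go_eq (n : Int) : ∀ (rest : List Int) (answer : Int) (heap fought : List Int) (s k : Int),
    fought.Perm heap → fought.Pairwise (· ≤ ·) →
    solGo n rest answer heap s k = solAltGo n rest answer fought s k := by
  intro rest
  induction rest with
  | nil => intro answer heap fought s k _ _; simp [solGo, solAltGo]
  | cons en rest ih =>
      intro answer heap fought s k hperm hsorted
      simp only [solGo, solAltGo]
      set heap2 := heap ++ [en] with hheap2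
      set fought2 := PySem.List.insert fought ((bsLoop fought en 0 fought.length : Nat) : Int) en with hfought2
      obtain ⟨hpf, hsorted2, hne⟩ := insert_bs_facts fought en hsorted
      have hperm2 : fought2.Perm heap2 := by
        refine hpf.trans ?_
        exact (hperm.cons en).trans (List.perm_append_singleton en heap).symm
      by_cases hs : s + en > n
      · simp only [if_pos hs]
        by_cases hk : k = 0
        · simp [hk]
        · simp only [if_neg hk]
          -- decompose fought2 = d ++ [m]
          rcases (fought2.eq_nil_or_concat) with hnil | ⟨d, m, hdm⟩
          · exact absurd hnil hne
          rw [List.concat_eq_append] at hdm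
          have hpop : PySem.List.pop? fought2 (-1) = some (m, d) := by
            rw [hdm]; exact PySem.List.pop?_last d m
          -- m is the maximum of fought2, hence of heap2
          have hmax_f : ∀ y ∈ fought2, y ≤ m := by
            rw [hdm]; exact sorted_last_max (hdm ▸ hsorted2)
          have hm_mem_f : m ∈ fought2 := by rw [hdm]; simp
          have hne2 : heap2 ≠ [] := by simp [hheap2]
          obtain ⟨m', hm'⟩ : ∃ m', PySem.List.max? heap2 (fun x => x) = some m' := by
            cases hmx : PySem.List.max? heap2 (fun x => x) with
            | none => exact absurd ((PySem.List.max?_eq_none_iff _ _).mp hmx) hne2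
            | some v => exact ⟨v, rfl⟩
          have hm'_mem : m' ∈ heap2 := PySem.List.max?_mem hm'
          have hm'_max : ∀ y ∈ heap2, y ≤ m' := PySem.List.max?_isMax hm'
          have hmm : m' = m := by
            have h1 : m' ≤ m := hmax_f m' (hperm2.mem_iff.mpr hm'_mem)
            have h2 : m ≤ m' := hm'_max m (hperm2.mem_iff.mp hm_mem_f)
            omega
          have hm_mem_h : m ∈ heap2 := hmm ▸ hm'_mem
          have hrem : PySem.List.remove? heap2 m = some (heap2.erase m) :=
            PySem.List.remove?_eq_some_erase heap2 m hm_mem_h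
          rw [hm', hmm]
          simp only [hrem, hpop]
          -- remaining states are again related
          have hperm3 : d.Perm (heap2.erase m) := by
            have h1 : fought2.Perm (m :: d) := by
              rw [hdm]; exact List.perm_append_singleton m d
            have h2 : (heap2.erase m).Perm ((m :: d).erase m) :=
              (hperm2.symm.trans h1).erase m
            simpa using h2.symm
          have hsorted3 : d.Pairwise (· ≤ ·) := by
            have : d.Sublist fought2 := by rw [hdm]; exact List.sublist_append_left d [m]
            exact hsorted2.sublist this
          exact ih (answer + 1) (heap2.erase m) d (s + en - m) (k - 1) hperm3 hsorted3
      · simp only [if_neg hs]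
        exact ih (answer + 1) heap2 fought2 (s + en) k hperm2 hsorted2

-- ===== VERDICT (by name: the statement is the Claim_ definition above) =====
theorem solution_spec : Claim_equal_solution := by
  intro n k enemy _
  unfold Spec_solution solution solution_alt
  exact go_eq n enemy 0 [] [] 0 k (List.Perm.refl _) (by simp)
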